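-- pv_equiv track=rewrite | github.com/griff4692/calibrating-summaries | eval/bertscore.py | top_k_sents
-- ===== SOURCE A (Python) =====
-- def top_k_sents(candidates, source_order, max_tokens=1024):
--     output_idxs = []
--     tokens_so_far = 0
--     for idx in source_order:
--         candidate = candidates[idx]
--         num_toks = len(candidate.split(' '))
--         if tokens_so_far + num_toks > max_tokens:
--             break
--
--         tokens_so_far += num_toks
--         output_idxs.append(idx)
--
--     return [candidates[idx] for idx in sorted(output_idxs)]
-- ===== SOURCE B (Python) =====
-- def top_k_sents(candidates, source_order, max_tokens=1024):
--     counts = [len(candidates[idx].split(' ')) for idx in source_order]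
--     prefix = []
--     total = 0
--     for c in counts:
--         total += c
--         prefix.append(total)
--     k = sum(1 for p in prefix if p <= max_tokens)
--     return [candidates[idx] for idx in sorted(source_order[:k])]
-- ===== Notes on version B (the rewrite author's own statement) =====
-- stated objective: alternative
-- what changed: Replaces the accumulate-until-overflow break loop by a whole-list token-count map, an explicit prefix-sum table and a count of prefixes within budget that yields the cutoff k, then takes source_order[:k].
-- outside the precondition, e.g. on top_k_sents(['a b c'], [0, 5], 2): A returns [], B raises IndexError
import Mathlib
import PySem

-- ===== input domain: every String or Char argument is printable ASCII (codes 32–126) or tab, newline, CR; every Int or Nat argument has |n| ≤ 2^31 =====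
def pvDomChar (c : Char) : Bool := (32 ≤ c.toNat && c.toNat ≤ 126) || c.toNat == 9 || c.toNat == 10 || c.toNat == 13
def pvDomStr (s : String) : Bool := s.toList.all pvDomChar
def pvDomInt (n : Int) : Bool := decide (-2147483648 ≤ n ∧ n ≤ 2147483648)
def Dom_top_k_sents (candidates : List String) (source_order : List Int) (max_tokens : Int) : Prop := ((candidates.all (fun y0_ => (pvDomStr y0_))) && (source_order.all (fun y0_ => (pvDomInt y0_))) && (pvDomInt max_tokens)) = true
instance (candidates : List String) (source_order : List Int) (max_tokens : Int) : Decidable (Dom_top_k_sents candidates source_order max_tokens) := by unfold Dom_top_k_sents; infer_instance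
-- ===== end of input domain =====

-- B replaces A's accumulate-until-overflow break loop by a full token-count map, a prefix-sum
-- table and a count of within-budget prefixes that gives the cutoff k (alternative, same cost).

-- len(candidate.split(' ')) — shared primitive expression of both Pythons
def pySplitLen (cand : String) : Int :=
  (((PySem.Str.split? cand " ").getD []).length : Int)

-- ===== PORT A =====
def tksLoopA (candidates : List String) (max_tokens : Int) :
    List Int → Int → List Int → List Int
  | [], _, acc => acc
  | idx :: rest, toks, acc =>
    match PySem.List.pyGet? candidates idx with
    | none => acc   -- Python raises IndexError here; excluded by Pre_
    | some cand =>
      let n := pySplitLen cand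
      if toks + n > max_tokens then acc
      else tksLoopA candidates max_tokens rest (toks + n) (acc ++ [idx])

def top_k_sents (candidates : List String) (source_order : List Int) (max_tokens : Int) : List String :=
  let output_idxs := tksLoopA candidates max_tokens source_order 0 []
  (PySem.List.sorted output_idxs (fun x => x) false).map
    (fun idx => (PySem.List.pyGet? candidates idx).getD "")   -- getD unreachable under Pre_

-- ===== PORT B =====
-- the prefix loop: total += c; prefix.append(total)
def tksPrefix (total : Int) : List Int → List Int
  | [] => []
  | c :: rest => (total + c) :: tksPrefix (total + c) rest

def top_k_sents_alt (candidates : List String) (source_order : List Int) (max_tokens : Int) : List String :=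
  let counts := source_order.map
    (fun idx => pySplitLen ((PySem.List.pyGet? candidates idx).getD ""))   -- getD unreachable under Pre_
  let pref := tksPrefix 0 counts
  let k := pref.countP (fun p => decide (p ≤ max_tokens))
  (PySem.List.sorted (source_order.take k) (fun x => x) false).map
    (fun idx => (PySem.List.pyGet? candidates idx).getD "")

-- ===== PRECONDITION & SPEC =====
-- Pre_ requires every index of source_order to be a valid Python index into candidates; this is
-- narrower than A's exact returning set (A may break before ever reading an out-of-range index,
-- while B reads them all and raises), so those early-break inputs are excluded and stated in cites.
def Pre_top_k_sents (candidates : List String) (source_order : List Int) (max_tokens : Int) : Prop :=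
  ∀ i ∈ source_order, -(candidates.length : Int) ≤ i ∧ i < candidates.length

instance (candidates : List String) (source_order : List Int) (max_tokens : Int) : Decidable (Pre_top_k_sents candidates source_order max_tokens) := by unfold Pre_top_k_sents; infer_instance

def pvWitness_top_k_sents : List String × List Int × Int := (["a b", "c d e"], [1, 0], 10)

def Spec_top_k_sents (candidates : List String) (source_order : List Int) (max_tokens : Int) (out : List String) : Prop := out = top_k_sents_alt candidates source_order max_tokens
instance (candidates : List String) (source_order : List Int) (max_tokens : Int) (out : List String) : Decidable (Spec_top_k_sents candidates source_order max_tokens out) := by unfold Spec_top_k_sents; infer_instance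

-- ===== CLAIM (what is proved, stated in full; the proofs are below) =====
def Claim_equal_top_k_sents : Prop := ∀ (candidates : List String) (source_order : List Int) (max_tokens : Int), Dom_top_k_sents candidates source_order max_tokens → Pre_top_k_sents candidates source_order max_tokens → Spec_top_k_sents candidates source_order max_tokens (top_k_sents candidates source_order max_tokens)

-- ===== LEMMAS AND PROOFS =====

lemma pySplitLen_nonneg (cand : String) : 0 ≤ pySplitLen cand := by
  unfold pySplitLen; positivity

lemma tksPrefix_ge (counts : List Int) (h : ∀ x ∈ counts, 0 ≤ x) :
    ∀ t, ∀ p ∈ tksPrefix t counts, t ≤ p := by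
  induction counts with
  | nil => intro t p hp; simp [tksPrefix] at hp
  | cons c rest ih =>
    intro t p hp
    have hc : 0 ≤ c := h c (by simp)
    simp only [tksPrefix, List.mem_cons] at hp
    rcases hp with rfl | hp
    · omega
    · have := ih (fun x hx => h x (by simp [hx])) (t + c) p hp
      omega

lemma pyGet?_isSome_of_inRange (xs : List String) (i : Int)
    (h : -(xs.length : Int) ≤ i ∧ i < xs.length) : (PySem.List.pyGet? xs i).isSome := by
  simp [PySem.List.pyGet?, PySem.List.pyIdx?]
  split_ifs with h1 <;> simp <;> omega

lemma loopA_eq_take (c : List String) (mt : Int) :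
    ∀ (order : List Int) (toks : Int) (acc : List Int),
    (∀ i ∈ order, (PySem.List.pyGet? c i).isSome) →
    tksLoopA c mt order toks acc =
      acc ++ order.take ((tksPrefix toks (order.map
        (fun idx => pySplitLen ((PySem.List.pyGet? c idx).getD "")))).countP
          (fun p => decide (p ≤ mt))) := by
  intro order
  induction order with
  | nil => intro toks acc _; simp [tksLoopA, tksPrefix]
  | cons idx rest ih =>
    intro toks acc hsome
    have hidx : (PySem.List.pyGet? c idx).isSome := hsome idx (by simp)
    obtain ⟨cand, hcand⟩ := Option.isSome_iff_exists.mp hidx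
    have hrest : ∀ i ∈ rest, (PySem.List.pyGet? c i).isSome :=
      fun i hi => hsome i (by simp [hi])
    simp only [tksLoopA, hcand, List.map_cons, tksPrefix, Option.getD_some]
    set n := pySplitLen cand with hn
    by_cases hb : toks + n > mt
    · -- break: no later prefix is within budget either
      have hcnt : ((tksPrefix (toks + n) (rest.map
          (fun idx => pySplitLen ((PySem.List.pyGet? c idx).getD "")))).countP
            (fun p => decide (p ≤ mt))) = 0 := by
        rw [List.countP_eq_zero]
        intro p hp
        have := tksPrefix_ge _ (by
          intro x hx
          simp only [List.mem_map] at hx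
          obtain ⟨j, _, rfl⟩ := hx
          exact pySplitLen_nonneg _) (toks + n) p hp
        simp only [decide_eq_true_eq]
        omega
      simp [hb, hcnt, decide_eq_true_eq]

    · -- continue
      have hle : toks + n ≤ mt := by omega
      rw [if_neg hb, ih (toks + n) (acc ++ [idx]) hrest]
      have : ((toks + n) :: tksPrefix (toks + n) (rest.map
          (fun idx => pySplitLen ((PySem.List.pyGet? c idx).getD "")))).countP
            (fun p => decide (p ≤ mt))
          = (tksPrefix (toks + n) (rest.map
          (fun idx => pySplitLen ((PySem.List.pyGet? c idx).getD "")))).countP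
            (fun p => decide (p ≤ mt)) + 1 := by
        simp [hle]
      rw [this]
      simp [List.take_succ_cons]

-- ===== VERDICT (by name: the statement is the Claim_ definition above) =====
theorem top_k_sents_spec : Claim_equal_top_k_sents := by
  intro candidates source_order max_tokens _ hpre
  unfold Spec_top_k_sents top_k_sents top_k_sents_alt
  have hsome : ∀ i ∈ source_order, (PySem.List.pyGet? candidates i).isSome := by
    intro i hi
    exact pyGet?_isSome_of_inRange candidates i (hpre i hi)
  rw [loopA_eq_take candidates max_tokens source_order 0 [] hsome]
  simp
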